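-- pv_equiv track=rewrite | github.com/SiriRise/payment-anomaly-detector | pdf_markup_service/app/ner_5_server.py | parse_qr_gost
-- ===== SOURCE A (Python) =====
-- def _digits_only(s: str) -> str:
--     return "".join(c for c in s if c.isdigit())
--
-- def parse_qr_gost(text: str | None) -> dict:
--     if not text or "ST00012" not in text:
--         return {}
--
--     result: dict = {}
--     parts = text.split("|")
--
--     data_map: dict[str, str] = {}
--     for part in parts:
--         if "=" in part:
--             key, val = part.split("=", 1)
--             data_map[key] = val
--
--     if "Name" in data_map:
--         result["org_name"] = data_map["Name"]
--     if "PayeeINN" in data_map: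
--         inn = _digits_only(data_map["PayeeINN"])
--         result["inn"] = inn
--     if "BIC" in data_map:
--         bik = _digits_only(data_map["BIC"])
--         result["bik"] = bik
--     if "KPP" in data_map:
--         kpp = _digits_only(data_map["KPP"])
--         result["kpp"] = kpp
--     if "PersonalAcc" in data_map:
--         acc = _digits_only(data_map["PersonalAcc"])
--         result["rs_account"] = acc
--     if "Sum" in data_map:
--         result["sum"] = data_map["Sum"]
--     if "PaymPeriod" in data_map:
--         result["period"] = data_map["PaymPeriod"]
--     if "Purpose" in data_map:
--         result["purpose"] = data_map["Purpose"]
--     if "LastName" in data_map: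
--         result["lastName"] = data_map["LastName"]
--     if "FirstName" in data_map:
--         result["firstName"] = data_map["FirstName"]
--     if "MiddleName" in data_map:
--         result["middleName"] = data_map["MiddleName"]
--     if "PayerAddress" in data_map:
--         result["payerAddress"] = data_map["PayerAddress"]
--     if "CorrespAcc" in data_map:
--         result["correspAcc"] = data_map["CorrespAcc"]
--     result["source_type"] = "QR_CODE"
--     return result
-- ===== SOURCE B (Python) =====
-- _SPEC = [
--     ("Name", "org_name", False),
--     ("PayeeINN", "inn", True),
--     ("BIC", "bik", True),
--     ("KPP", "kpp", True),
--     ("PersonalAcc", "rs_account", True),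
--     ("Sum", "sum", False),
--     ("PaymPeriod", "period", False),
--     ("Purpose", "purpose", False),
--     ("LastName", "lastName", False),
--     ("FirstName", "firstName", False),
--     ("MiddleName", "middleName", False),
--     ("PayerAddress", "payerAddress", False),
--     ("CorrespAcc", "correspAcc", False),
-- ]
--
--
-- def parse_qr_gost(text):
--     if not text or "ST00012" not in text:
--         return {}
--
--     parts = text.split("|")
--
--     def last_value(key):
--         # last 'key=...' part wins, matching dict overwrite semantics
--         found = None
--         for part in parts:
--             if "=" in part:
--                 k, v = part.split("=", 1)
--                 if k == key:
--                     found = v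
--         return found
--
--     result = {}
--     for key, field, dig in _SPEC:
--         v = last_value(key)
--         if v is not None:
--             result[field] = "".join(filter(str.isdigit, v)) if dig else v
--     result["source_type"] = "QR_CODE"
--     return result
-- ===== Notes on version B (the rewrite author's own statement) =====
-- stated objective: alternative
-- what changed: A makes one pass building a raw-key dict and then runs 13 hand-written membership-tested branches; B builds no dict at all: for each of the 13 spec entries it runs a staged scan over the parts keeping the last matching value (last-wins accumulator), writing the output fields directly in spec order.
import Mathlib
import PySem

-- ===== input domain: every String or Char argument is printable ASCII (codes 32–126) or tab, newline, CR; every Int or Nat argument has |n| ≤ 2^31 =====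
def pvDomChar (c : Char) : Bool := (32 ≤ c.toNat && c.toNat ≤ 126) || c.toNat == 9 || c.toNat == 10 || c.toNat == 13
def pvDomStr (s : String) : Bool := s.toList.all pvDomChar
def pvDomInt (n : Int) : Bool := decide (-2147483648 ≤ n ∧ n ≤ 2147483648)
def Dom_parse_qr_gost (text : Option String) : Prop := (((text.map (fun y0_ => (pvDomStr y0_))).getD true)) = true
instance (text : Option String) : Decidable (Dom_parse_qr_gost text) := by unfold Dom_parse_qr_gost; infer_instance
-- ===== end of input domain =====

-- B builds no intermediate dict: for each of the 13 spec fields it runs a staged last-wins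
-- scan over the parts and writes the field directly (objective: alternative decomposition).

-- ===== PORT A =====
-- _digits_only: "".join(c for c in s if c.isdigit())
def pvDigitsA (s : String) : String :=
  String.ofList (s.toList.filter (fun c => PySem.Chars.isdigit c))

-- loop body of A's first pass (build data_map from "key=val" parts)
def pvStepA (dm : PySem.Dict String String) (part : String) : PySem.Dict String String :=
  if PySem.Str.isIn "=" part then
    match PySem.Str.splitMax? part "=" 1 with
    | some (k :: v :: _) => dm.insert k v
    | _ => dm
  else dm

-- A's 13 membership-tested writes into result, in source order
def pvBuildA (dm : PySem.Dict String String) : PySem.Dict String String :=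
  let r : PySem.Dict String String := PySem.Dict.empty
  let r := match dm.get? "Name" with | some v => r.insert "org_name" v | none => r
  let r := match dm.get? "PayeeINN" with | some v => r.insert "inn" (pvDigitsA v) | none => r
  let r := match dm.get? "BIC" with | some v => r.insert "bik" (pvDigitsA v) | none => r
  let r := match dm.get? "KPP" with | some v => r.insert "kpp" (pvDigitsA v) | none => r
  let r := match dm.get? "PersonalAcc" with | some v => r.insert "rs_account" (pvDigitsA v) | none => r
  let r := match dm.get? "Sum" with | some v => r.insert "sum" v | none => r
  let r := match dm.get? "PaymPeriod" with | some v => r.insert "period" v | none => r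
  let r := match dm.get? "Purpose" with | some v => r.insert "purpose" v | none => r
  let r := match dm.get? "LastName" with | some v => r.insert "lastName" v | none => r
  let r := match dm.get? "FirstName" with | some v => r.insert "firstName" v | none => r
  let r := match dm.get? "MiddleName" with | some v => r.insert "middleName" v | none => r
  let r := match dm.get? "PayerAddress" with | some v => r.insert "payerAddress" v | none => r
  let r := match dm.get? "CorrespAcc" with | some v => r.insert "correspAcc" v | none => r
  r

def parse_qr_gost (text : Option String) : List (String × String) :=
  match text with
  | none => []
  | some t =>
    if t = "" ∨ PySem.Str.isIn "ST00012" t = false then []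
    else
      let parts := (PySem.Str.split? t "|").getD []
      let dm := parts.foldl pvStepA PySem.Dict.empty
      ((pvBuildA dm).insert "source_type" "QR_CODE").items

-- ===== PORT B =====
-- the spec table _SPEC: (gost key, output field, needs digit filter)
def pvTable : List (String × String × Bool) :=
  [ ("Name", "org_name", false), ("PayeeINN", "inn", true), ("BIC", "bik", true)
  , ("KPP", "kpp", true), ("PersonalAcc", "rs_account", true), ("Sum", "sum", false)
  , ("PaymPeriod", "period", false), ("Purpose", "purpose", false)
  , ("LastName", "lastName", false), ("FirstName", "firstName", false)
  , ("MiddleName", "middleName", false), ("PayerAddress", "payerAddress", false)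
  , ("CorrespAcc", "correspAcc", false) ]

-- B's "".join(filter(str.isdigit, v))
def pvDigitsB (s : String) : String :=
  String.ofList (s.toList.filter PySem.Chars.isdigit)

-- B's per-key staged scan: last 'key=...' part wins
def pvLastVal (parts : List String) (key : String) : Option String :=
  parts.foldl (fun found part =>
    if PySem.Str.isIn "=" part then
      match PySem.Str.splitMax? part "=" 1 with
      | some (k :: v :: _) => if k = key then some v else found
      | _ => found
    else found) none

def parse_qr_gost_alt (text : Option String) : List (String × String) :=
  match text with
  | none => []
  | some t =>
    if t = "" ∨ PySem.Str.isIn "ST00012" t = false then []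
    else
      let parts := (PySem.Str.split? t "|").getD []
      let r := pvTable.foldl (fun r e =>
        match pvLastVal parts e.1 with
        | some v => r.insert e.2.1 (if e.2.2 then pvDigitsB v else v)
        | none => r) PySem.Dict.empty
      (r.insert "source_type" "QR_CODE").items

-- ===== PRECONDITION & SPEC =====
def Spec_parse_qr_gost (text : Option String) (out : List (String × String)) : Prop := out = parse_qr_gost_alt text
instance (text : Option String) (out : List (String × String)) : Decidable (Spec_parse_qr_gost text out) := by unfold Spec_parse_qr_gost; infer_instance

-- ===== CLAIM (what is proved, stated in full; the proofs are below) =====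
def Claim_equal_parse_qr_gost : Prop := ∀ (text : Option String), Dom_parse_qr_gost text → Spec_parse_qr_gost text (parse_qr_gost text)

-- ===== LEMMAS AND PROOFS =====

-- B's staged last-wins scan reads off exactly A's data_map lookup
lemma pvFold_get (parts : List String) (dm : PySem.Dict String String) (key : String) :
    (parts.foldl pvStepA dm).get? key
      = parts.foldl (fun found part =>
          if PySem.Str.isIn "=" part then
            match PySem.Str.splitMax? part "=" 1 with
            | some (k :: v :: _) => if k = key then some v else found
            | _ => found
          else found) (dm.get? key) := by
  induction parts generalizing dm with
  | nil => rfl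
  | cons p ps ih =>
    simp only [List.foldl_cons]
    rw [ih]
    congr 1
    by_cases hin : PySem.Str.isIn "=" p
    · have hin' : PySem.Chars.isIn ['='] p.toList = true := by simpa using hin
      cases hs : PySem.Str.splitMax? p "=" 1 with
      | none => simp [pvStepA, hin', hs]
      | some l =>
        match l with
        | [] => simp [pvStepA, hin', hs]
        | [x] => simp [pvStepA, hin', hs]
        | k :: v :: rest =>
          by_cases hk : k = key
          · subst hk
            simp [pvStepA, hin', hs, PySem.Dict.get?_insert_self]
          · simp [pvStepA, hin', hs, hk, PySem.Dict.get?_insert_of_ne dm v (Ne.symm hk)]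
    · have hni : PySem.Chars.isIn ['='] p.toList = false := by simpa using hin
      simp [pvStepA, hni]

lemma pvLastVal_eq (parts : List String) (key : String) :
    pvLastVal parts key = (parts.foldl pvStepA PySem.Dict.empty).get? key := by
  rw [pvFold_get]
  rfl

-- ===== VERDICT (by name: the statement is the Claim_ definition above) =====
theorem parse_qr_gost_spec : Claim_equal_parse_qr_gost := by
  intro text _
  unfold Spec_parse_qr_gost parse_qr_gost parse_qr_gost_alt
  cases text with
  | none => rfl
  | some t =>
    by_cases hg : t = "" ∨ PySem.Str.isIn "ST00012" t = false
    · simp only [hg, if_true]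
    · simp only [hg, if_false]
      congr 1
      congr 1
      simp only [pvTable, List.foldl_cons, List.foldl_nil, pvLastVal_eq]
      unfold pvBuildA
      rfl
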